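-- pv_equiv track=rewrite | github.com/synesissoftware/asynkio | asynkio/time/types.py | _scale_index
-- ===== SOURCE A (Python) =====
-- def _scale_index(n : int) -> tuple[int, int]:
--
--     _SCALES = [
--         1,
--         10,
--         100,
--         1_000,
--         10_000,
--         100_000,
--         1_000_000,
--         10_000_000,
--         100_000_000,
--         1_000_000_000,
--         10_000_000_000,
--         100_000_000_000,
--     ]
--
--     assert n > 0
--     assert len(_SCALES) == 12
--
--     if n >= 100_000_000_000:
--
--         return (11, _SCALES[11])
--
--     l = 0
--     h = 11
--
--     count = 0
--
--     while l <= h: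
--
--         count += 1
--
--         assert count < 5, f"too many loops while trying to scale {n}"
--
--         m = (h + l) // 2
--
--         b = _SCALES[m]
--
--         if n == b:
--
--             return (m, b)
--
--         if n < b:
--
--             h = m
--
--             continue
--         else:
--             assert n > b
--
--             if n < b * 10:
--
--                 return (m, b)
--             else:
--
--                 l = m
--
--     return (11, _SCALES[11])
-- ===== SOURCE B (Python) =====
-- def _scale_index(n : int) -> tuple[int, int]:
--
--     assert n > 0
--
--     s = 1
--
--     for m in range(11):
--
--         if n < s * 10:
--
--             return (m, s)
--
--         s *= 10
--
--     return (11, 100_000_000_000)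
-- ===== Notes on version B (the rewrite author's own statement) =====
-- stated objective: simpler
-- what changed: Replaced A's lo/hi binary search over the _SCALES table (with its loop counter and n>=10^11 special case) by a single forward scan with a running power-of-ten accumulator that returns at the first bucket containing n.
import Mathlib
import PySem

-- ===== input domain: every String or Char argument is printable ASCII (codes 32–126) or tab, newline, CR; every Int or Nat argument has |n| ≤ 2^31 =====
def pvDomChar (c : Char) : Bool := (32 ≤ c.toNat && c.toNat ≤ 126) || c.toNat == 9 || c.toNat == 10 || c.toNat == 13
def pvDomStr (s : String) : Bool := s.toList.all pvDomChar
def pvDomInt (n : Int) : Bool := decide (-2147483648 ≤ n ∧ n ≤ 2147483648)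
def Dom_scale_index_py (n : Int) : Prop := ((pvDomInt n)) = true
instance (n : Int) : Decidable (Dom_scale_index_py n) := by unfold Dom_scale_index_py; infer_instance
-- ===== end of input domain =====

-- B replaces A's lo/hi binary search over _SCALES by a single forward scan with a running
-- power-of-ten accumulator (objective: simpler). Pre_ excludes n ≤ 0, where A raises AssertionError.

-- ===== PORT A =====
-- the _SCALES list, as in A
def pySCALES : List Int :=
  [1, 10, 100, 1000, 10000, 100000, 1000000, 10000000, 100000000, 1000000000,
   10000000000, 100000000000]

-- A's while loop; `count` is A's loop counter, `none` = the `assert count < 5` (or an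
-- out-of-range _SCALES[m]) raising; unreachable for the inputs Pre_ admits
def pyALoop (n l h : Int) (count : Nat) : Option (Int × Int) :=
  if _hlh : l ≤ h then
    if _hcount : count + 1 < 5 then
      let m := PySem.Int.floordiv (h + l) 2
      match PySem.List.pyGet? pySCALES m with
      | none => none
      | some b =>
        if n = b then some (m, b)
        else if n < b then pyALoop n l m (count + 1)
        else if n < b * 10 then some (m, b)
        else pyALoop n m h (count + 1)
    else none
  else some (11, 100000000000)
termination_by 5 - count
decreasing_by all_goals omega

def scale_index_py (n : Int) : Int × Int :=
  -- `assert n > 0` raises for n ≤ 0: those inputs are excluded by Pre_; the .getD default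
  -- stands for the places where A raises and is never reached on Pre_
  if n ≥ 100000000000 then (11, 100000000000)
  else (pyALoop n 0 11 0).getD (0, 0)

-- ===== PORT B =====
-- B's for-loop over range(11) with the running power of ten s
def pyBLoop (n s : Int) (m : Nat) : Int × Int :=
  if m < 11 then
    if n < s * 10 then ((m : Int), s)
    else pyBLoop n (s * 10) (m + 1)
  else (11, 100000000000)
termination_by 11 - m

def scale_index_py_alt (n : Int) : Int × Int :=
  pyBLoop n 1 0

-- ===== PRECONDITION & SPEC =====
-- A's `assert n > 0` raises AssertionError for n ≤ 0; exactly those inputs are excluded.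
def Pre_scale_index_py (n : Int) : Prop := 0 < n
instance (n : Int) : Decidable (Pre_scale_index_py n) := by unfold Pre_scale_index_py; infer_instance
def pvWitness_scale_index_py : Int := (7)

def Spec_scale_index_py (n : Int) (out : Int × Int) : Prop := out = scale_index_py_alt n
instance (n : Int) (out : Int × Int) : Decidable (Spec_scale_index_py n out) := by unfold Spec_scale_index_py; infer_instance

-- ===== CLAIM (what is proved, stated in full; the proofs are below) =====
def Claim_equal_scale_index_py : Prop := ∀ (n : Int), Dom_scale_index_py n → Pre_scale_index_py n → Spec_scale_index_py n (scale_index_py n)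

-- ===== LEMMAS AND PROOFS =====

-- one probe of A's binary search, with the midpoint and table entry evaluated
lemma pyALoop_step (n l h : Int) (count : Nat) (m b : Int)
    (hlh : l ≤ h) (hc : count + 1 < 5)
    (hm : PySem.Int.floordiv (h + l) 2 = m)
    (hb : PySem.List.pyGet? pySCALES m = some b) :
    pyALoop n l h count =
      if n = b then some (m, b)
      else if n < b then pyALoop n l m (count + 1)
      else if n < b * 10 then some (m, b)
      else pyALoop n m h (count + 1) := by
  rw [pyALoop, dif_pos hlh, dif_pos hc]
  simp only [hm, hb]

-- On [10^k, 10^(k+1)) with k ≤ 9 (all of Dom ∩ Pre_), A's binary search lands on bucket k.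
lemma scale_index_py_interval (n : Int) (k : Nat) (hk : k ≤ 9)
    (h1 : (10 : Int) ^ k ≤ n) (h2 : n < (10 : Int) ^ (k + 1)) :
    scale_index_py n = ((k : Int), (10 : Int) ^ k) := by
  interval_cases k <;> norm_num at h1 h2 ⊢ <;>
    rw [scale_index_py, if_neg (by omega),
        pyALoop_step n 0 11 0 5 100000 (by norm_num) (by norm_num) (by decide) (by decide)]
  -- k = 0
  · rw [if_neg (by omega), if_pos (by omega),
        pyALoop_step n 0 5 1 2 100 (by norm_num) (by norm_num) (by decide) (by decide),
        if_neg (by omega), if_pos (by omega),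
        pyALoop_step n 0 2 2 1 10 (by norm_num) (by norm_num) (by decide) (by decide),
        if_neg (by omega), if_pos (by omega),
        pyALoop_step n 0 1 3 0 1 (by norm_num) (by norm_num) (by decide) (by decide)]
    split_ifs <;> first | rfl | omega
  -- k = 1
  · rw [if_neg (by omega), if_pos (by omega),
        pyALoop_step n 0 5 1 2 100 (by norm_num) (by norm_num) (by decide) (by decide),
        if_neg (by omega), if_pos (by omega),
        pyALoop_step n 0 2 2 1 10 (by norm_num) (by norm_num) (by decide) (by decide)]
    split_ifs <;> first | rfl | omega
  -- k = 2
  · rw [if_neg (by omega), if_pos (by omega),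
        pyALoop_step n 0 5 1 2 100 (by norm_num) (by norm_num) (by decide) (by decide)]
    split_ifs <;> first | rfl | omega
  -- k = 3
  · rw [if_neg (by omega), if_pos (by omega),
        pyALoop_step n 0 5 1 2 100 (by norm_num) (by norm_num) (by decide) (by decide),
        if_neg (by omega), if_neg (by omega), if_neg (by omega),
        pyALoop_step n 2 5 2 3 1000 (by norm_num) (by norm_num) (by decide) (by decide)]
    split_ifs <;> first | rfl | omega
  -- k = 4
  · rw [if_neg (by omega), if_pos (by omega),
        pyALoop_step n 0 5 1 2 100 (by norm_num) (by norm_num) (by decide) (by decide),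
        if_neg (by omega), if_neg (by omega), if_neg (by omega),
        pyALoop_step n 2 5 2 3 1000 (by norm_num) (by norm_num) (by decide) (by decide),
        if_neg (by omega), if_neg (by omega), if_neg (by omega),
        pyALoop_step n 3 5 3 4 10000 (by norm_num) (by norm_num) (by decide) (by decide)]
    split_ifs <;> first | rfl | omega
  -- k = 5
  · split_ifs <;> first | rfl | omega
  -- k = 6
  · rw [if_neg (by omega), if_neg (by omega), if_neg (by omega),
        pyALoop_step n 5 11 1 8 100000000 (by norm_num) (by norm_num) (by decide) (by decide),
        if_neg (by omega), if_pos (by omega),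
        pyALoop_step n 5 8 2 6 1000000 (by norm_num) (by norm_num) (by decide) (by decide)]
    split_ifs <;> first | rfl | omega
  -- k = 7
  · rw [if_neg (by omega), if_neg (by omega), if_neg (by omega),
        pyALoop_step n 5 11 1 8 100000000 (by norm_num) (by norm_num) (by decide) (by decide),
        if_neg (by omega), if_pos (by omega),
        pyALoop_step n 5 8 2 6 1000000 (by norm_num) (by norm_num) (by decide) (by decide),
        if_neg (by omega), if_neg (by omega), if_neg (by omega),
        pyALoop_step n 6 8 3 7 10000000 (by norm_num) (by norm_num) (by decide) (by decide)]
    split_ifs <;> first | rfl | omega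
  -- k = 8
  · rw [if_neg (by omega), if_neg (by omega), if_neg (by omega),
        pyALoop_step n 5 11 1 8 100000000 (by norm_num) (by norm_num) (by decide) (by decide)]
    split_ifs <;> first | rfl | omega
  -- k = 9
  · rw [if_neg (by omega), if_neg (by omega), if_neg (by omega),
        pyALoop_step n 5 11 1 8 100000000 (by norm_num) (by norm_num) (by decide) (by decide),
        if_neg (by omega), if_neg (by omega), if_neg (by omega),
        pyALoop_step n 8 11 2 9 1000000000 (by norm_num) (by norm_num) (by decide) (by decide)]
    split_ifs <;> first | rfl | omega

-- B's scan, started at step m with accumulator 10^m, returns bucket k on [10^k, 10^(k+1)).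
lemma pyBLoop_interval (n : Int) (k m : Nat) (hm : m ≤ k) (hk : k ≤ 10)
    (h1 : (10 : Int) ^ k ≤ n) (h2 : n < (10 : Int) ^ (k + 1)) :
    pyBLoop n ((10 : Int) ^ m) m = ((k : Int), (10 : Int) ^ k) := by
  induction hd : k - m generalizing m with
  | zero =>
      have hmeq : m = k := by omega
      rw [pyBLoop]
      have hlt : n < (10 : Int) ^ m * 10 := by
        rw [hmeq, (by ring : (10 : Int) ^ k * 10 = 10 ^ (k + 1))]
        exact h2
      rw [if_pos (by omega), if_pos hlt, hmeq]
  | succ d ih =>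
      rw [pyBLoop]
      have hmk' : m < k := by omega
      have hnot : ¬ n < (10 : Int) ^ m * 10 := by
        have he : (10 : Int) ^ m * 10 = (10 : Int) ^ (m + 1) := by ring
        rw [he]
        have : (10 : Int) ^ (m + 1) ≤ (10 : Int) ^ k :=
          pow_le_pow_right₀ (by norm_num) hmk'
        omega
      have hm11 : m < 11 := by omega
      simp only [hm11, if_true, hnot, if_false]
      have he : (10 : Int) ^ m * 10 = (10 : Int) ^ (m + 1) := by ring
      rw [he]
      exact ih (m + 1) (by omega) (by omega)

-- ===== VERDICT (by name: the statement is the Claim_ definition above) =====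
theorem scale_index_py_spec : Claim_equal_scale_index_py := by
  intro n hdom hpre
  unfold Spec_scale_index_py
  have hn : 0 < n := hpre
  have hub : n ≤ 2147483648 := by
    simp [Dom_scale_index_py, pvDomInt] at hdom; omega
  have hcases : ∃ k : Nat, k ≤ 9 ∧ (10 : Int) ^ k ≤ n ∧ n < (10 : Int) ^ (k + 1) := by
    rcases (by omega :
        (1 ≤ n ∧ n < 10) ∨ (10 ≤ n ∧ n < 100) ∨ (100 ≤ n ∧ n < 1000) ∨
        (1000 ≤ n ∧ n < 10000) ∨ (10000 ≤ n ∧ n < 100000) ∨ (100000 ≤ n ∧ n < 1000000) ∨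
        (1000000 ≤ n ∧ n < 10000000) ∨ (10000000 ≤ n ∧ n < 100000000) ∨
        (100000000 ≤ n ∧ n < 1000000000) ∨ (1000000000 ≤ n ∧ n < 10000000000)) with
      h | h | h | h | h | h | h | h | h | h
    · exact ⟨0, by norm_num, by norm_num [h.1], by norm_num [h.2]⟩
    · exact ⟨1, by norm_num, by norm_num [h.1], by norm_num [h.2]⟩
    · exact ⟨2, by norm_num, by norm_num [h.1], by norm_num [h.2]⟩
    · exact ⟨3, by norm_num, by norm_num [h.1], by norm_num [h.2]⟩
    · exact ⟨4, by norm_num, by norm_num [h.1], by norm_num [h.2]⟩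
    · exact ⟨5, by norm_num, by norm_num [h.1], by norm_num [h.2]⟩
    · exact ⟨6, by norm_num, by norm_num [h.1], by norm_num [h.2]⟩
    · exact ⟨7, by norm_num, by norm_num [h.1], by norm_num [h.2]⟩
    · exact ⟨8, by norm_num, by norm_num [h.1], by norm_num [h.2]⟩
    · exact ⟨9, by norm_num, by norm_num [h.1], by norm_num [h.2]⟩
  obtain ⟨k, hk, h1, h2⟩ := hcases
  rw [scale_index_py_interval n k hk h1 h2]
  unfold scale_index_py_alt
  have hb := pyBLoop_interval n k 0 (Nat.zero_le k) (by omega) h1 h2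
  simpa using hb.symm
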